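-- pv_equiv track=rewrite | github.com/humans-and-machines/Illusion-of-Reasoning | data/car_park/build_rush_small_balanced.py | _canon_labels
-- ===== SOURCE A (Python) =====
-- def _canon_labels(board: str) -> str:
--     """Relabel pieces to canonical letters (A fixed, others B,C,...) for hashing."""
--     mapping = {}
--     next_code = ord('B')
--     canonical_chars = []
--     for char in board:
--         if char in ('o', 'A'):
--             canonical_chars.append(char)
--             continue
--         if char not in mapping:
--             mapping[char] = chr(next_code)
--             next_code += 1
--         canonical_chars.append(mapping[char])
--     return "".join(canonical_chars)
-- ===== SOURCE B (Python) =====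
-- def _canon_labels(board: str) -> str:
--     """Relabel pieces to canonical letters (A fixed, others B,C,...) for hashing."""
--     pieces = dict.fromkeys(c for c in board if c not in ('o', 'A'))
--     mapping = {p: chr(ord('B') + i) for i, p in enumerate(pieces)}
--     return board.translate(str.maketrans(mapping))
-- ===== Notes on version B (the rewrite author's own statement) =====
-- stated objective: idiomatic
-- what changed: Replaces the single interleaved pass that grows the mapping while emitting with a two-phase structure: first derive the distinct pieces in first-appearance order and build the full translation table, then translate the whole board in a second pass (chars outside the table pass through unchanged).
import Mathlib
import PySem

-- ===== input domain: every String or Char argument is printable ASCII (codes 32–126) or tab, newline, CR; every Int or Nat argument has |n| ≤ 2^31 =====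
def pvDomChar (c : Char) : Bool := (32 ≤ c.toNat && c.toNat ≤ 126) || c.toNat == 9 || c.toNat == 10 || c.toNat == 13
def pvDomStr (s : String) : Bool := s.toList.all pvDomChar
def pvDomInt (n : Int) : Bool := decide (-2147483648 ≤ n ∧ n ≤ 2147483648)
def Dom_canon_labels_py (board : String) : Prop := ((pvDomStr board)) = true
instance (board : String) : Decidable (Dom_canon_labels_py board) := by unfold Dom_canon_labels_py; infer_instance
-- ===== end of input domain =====

-- B re-implements A as a two-phase build-table-then-translate pass (same cost, more idiomatic); return value only.

-- ===== PORT A =====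
-- the for-loop of A, state (mapping, next_code, canonical_chars)
def pvCanonLoopA : List Char → PySem.Dict Char Char → Int → List Char → List Char
  | [], _, _, acc => acc
  | c :: rest, mapping, next_code, acc =>
    if c == 'o' || c == 'A' then pvCanonLoopA rest mapping next_code (acc ++ [c])
    else if mapping.contains c then
      pvCanonLoopA rest mapping next_code (acc ++ [mapping.getD c c])
    else
      let m := mapping.insert c (Char.ofNat next_code.toNat)
      pvCanonLoopA rest m (next_code + 1) (acc ++ [m.getD c c])

def canon_labels_py (board : String) : String :=
  String.ofList (pvCanonLoopA board.toList PySem.Dict.empty 66 [])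

-- ===== PORT B =====
def pvKeep (c : Char) : Bool := !(c == 'o' || c == 'A')

-- {p: chr(ord('B') + i) for i, p in enumerate(pieces)}
def pvTableOf (pieces : List Char) : PySem.Dict Char Char :=
  (PySem.List.enumerate pieces).foldl (fun d p => d.insert p.2 (Char.ofNat ((66 : Int) + p.1).toNat)) PySem.Dict.empty

def canon_labels_py_alt (board : String) : String :=
  let pieces := PySem.List.dedup (board.toList.filter pvKeep)
  let table := pvTableOf pieces
  -- str.translate: chars absent from the table are unchanged
  String.ofList (board.toList.map (fun c => table.getD c c))

-- ===== PRECONDITION & SPEC =====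
def Spec_canon_labels_py (board : String) (out : String) : Prop := out = canon_labels_py_alt board
instance (board : String) (out : String) : Decidable (Spec_canon_labels_py board out) := by unfold Spec_canon_labels_py; infer_instance

-- ===== CLAIM (what is proved, stated in full; the proofs are below) =====
def Claim_equal_canon_labels_py : Prop := ∀ (board : String), Dom_canon_labels_py board → Spec_canon_labels_py board (canon_labels_py board)

-- ===== LEMMAS AND PROOFS =====

lemma pv_items_tableOf (l : List Char) (hnd : l.Nodup) :
    (pvTableOf l).items = (PySem.List.enumerate l).map (fun p => (p.2, Char.ofNat ((66 : Int) + p.1).toNat)) := by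
  have h := PySem.Dict.items_foldl_insert_fresh (PySem.List.enumerate l) (fun p => p.2)
    (fun p => Char.ofNat ((66 : Int) + p.1).toNat) PySem.Dict.empty
    (by intro a _; simp) (by simpa [PySem.List.map_snd_enumerate] using hnd)
  simpa [pvTableOf] using h

lemma pv_keys_tableOf (l : List Char) (hnd : l.Nodup) : (pvTableOf l).keys = l := by
  simp [PySem.Dict.keys, pv_items_tableOf l hnd, List.map_map, Function.comp_def,
    PySem.List.map_snd_enumerate]

lemma pv_tableOf_getD (l : List Char) (hnd : l.Nodup) (c : Char) :
    (pvTableOf l).getD c c = if c ∈ l then Char.ofNat (66 + l.idxOf c) else c := by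
  by_cases hc : c ∈ l
  · have hk : l.idxOf c < l.length := List.idxOf_lt_length_of_mem hc
    have hk' : l.idxOf c < (PySem.List.enumerate l).length := by
      simpa [PySem.List.length_enumerate] using hk
    have hmem : (c, Char.ofNat (66 + l.idxOf c)) ∈ (pvTableOf l).items := by
      rw [pv_items_tableOf l hnd]
      refine List.mem_map.2 ⟨((l.idxOf c : Int), c), ?_, ?_⟩
      · have h1 := PySem.List.getElem_enumerate l 0 (l.idxOf c) hk'
        simp only [zero_add] at h1
        have h2 : ((l.idxOf c : Int), c) = (PySem.List.enumerate l)[l.idxOf c] := by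
          rw [h1, List.getElem_idxOf hk]
        rw [h2]
        exact List.getElem_mem hk'
      · have h3 : ((66 : Int) + (l.idxOf c : Int)).toNat = 66 + l.idxOf c := by omega
        simp [h3]
    rw [PySem.Dict.getD_of_mem_items _ hmem (by rw [pv_keys_tableOf l hnd]; exact hnd) c,
      if_pos hc]
  · rw [PySem.Dict.getD_of_not_contains, if_neg hc]
    rw [PySem.Dict.contains_eq_decide_mem_keys, pv_keys_tableOf l hnd]
    simpa using hc

lemma pv_dedup_snoc (xs : List Char) (c : Char) :
    PySem.List.dedup (xs ++ [c]) =
      if c ∈ PySem.List.dedup xs then PySem.List.dedup xs else PySem.List.dedup xs ++ [c] := by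
  simp only [PySem.List.dedup_eq_ofList, PySem.Set.ofList_eq_foldl, List.foldl_append, List.foldl]
  by_cases hc : c ∈ xs.foldl PySem.Set.add []
  · simp [PySem.Set.add, PySem.Set.contains, hc]
  · simp [PySem.Set.add, PySem.Set.contains, hc]

lemma pv_dedup_prefix (xs ys : List Char) :
    PySem.List.dedup xs <+: PySem.List.dedup (xs ++ ys) := by
  induction ys generalizing xs with
  | nil => simp
  | cons y ys ih =>
    have h1 : xs ++ y :: ys = (xs ++ [y]) ++ ys := by simp
    rw [h1]
    refine List.IsPrefix.trans ?_ (ih (xs ++ [y]))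
    rw [pv_dedup_snoc]
    split
    · exact List.prefix_rfl
    · exact List.prefix_append _ _

lemma pv_idxOf_prefix {l₁ l₂ : List Char} (h : l₁ <+: l₂) {c : Char} (hc : c ∈ l₁) :
    l₂.idxOf c = l₁.idxOf c := by
  obtain ⟨t, rfl⟩ := h
  exact List.idxOf_append_of_mem hc

lemma pv_loopA_eq (full : List Char) (rest pref acc : List Char) (h : pref ++ rest = full) :
    pvCanonLoopA rest (pvTableOf (PySem.List.dedup (pref.filter pvKeep)))
        (66 + (PySem.List.dedup (pref.filter pvKeep)).length) acc
      = acc ++ rest.map (fun c => (pvTableOf (PySem.List.dedup (full.filter pvKeep))).getD c c) := by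
  induction rest generalizing pref acc with
  | nil => simp [pvCanonLoopA]
  | cons c rest ih =>
    have hfull : (pref ++ [c]) ++ rest = full := by simpa using h
    have hFsub : PySem.List.dedup (pref.filter pvKeep) <+:
        PySem.List.dedup (full.filter pvKeep) := by
      rw [← h, List.filter_append]
      exact pv_dedup_prefix _ _
    have hndp : (PySem.List.dedup (pref.filter pvKeep)).Nodup := PySem.List.nodup_dedup _
    have hndf : (PySem.List.dedup (full.filter pvKeep)).Nodup := PySem.List.nodup_dedup _
    by_cases hoa : (c == 'o' || c == 'A') = true
    · -- excluded char: passes through both sides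
      have hkeep : pvKeep c = false := by simp [pvKeep, hoa]
      have hnotin : c ∉ PySem.List.dedup (full.filter pvKeep) := by
        intro hmem
        have h2 := (PySem.List.mem_dedup _ _).1 hmem
        have := List.of_mem_filter h2
        simp [hkeep] at this
      have hsame : (pref ++ [c]).filter pvKeep = pref.filter pvKeep := by
        simp [List.filter_append, hkeep]
      rw [pvCanonLoopA, if_pos hoa]
      rw [show pref.filter pvKeep = (pref ++ [c]).filter pvKeep from hsame.symm]
      rw [ih (pref ++ [c]) (acc ++ [c]) hfull]
      simp only [List.map_cons]
      rw [pv_tableOf_getD _ hndf c, if_neg hnotin]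
      simp
    · have hkeep : pvKeep c = true := by simp [pvKeep, hoa]
      have hfc : (pref ++ [c]).filter pvKeep = pref.filter pvKeep ++ [c] := by
        simp [List.filter_append, hkeep]
      by_cases hin : c ∈ PySem.List.dedup (pref.filter pvKeep)
      · -- already mapped
        have hcont : (pvTableOf (PySem.List.dedup (pref.filter pvKeep))).contains c = true := by
          rw [PySem.Dict.contains_eq_decide_mem_keys, pv_keys_tableOf _ hndp]
          simpa using hin
        have hsame : PySem.List.dedup ((pref ++ [c]).filter pvKeep)
            = PySem.List.dedup (pref.filter pvKeep) := by
          rw [hfc, pv_dedup_snoc, if_pos hin]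
        rw [pvCanonLoopA, if_neg hoa, if_pos hcont]
        rw [show PySem.List.dedup (pref.filter pvKeep) = PySem.List.dedup ((pref ++ [c]).filter pvKeep) from hsame.symm]
        rw [ih (pref ++ [c]) _ hfull]
        have hvals : (pvTableOf (PySem.List.dedup ((pref ++ [c]).filter pvKeep))).getD c c
            = (pvTableOf (PySem.List.dedup (full.filter pvKeep))).getD c c := by
          rw [hsame, pv_tableOf_getD _ hndp c, if_pos hin,
            pv_tableOf_getD _ hndf c, if_pos (hFsub.mem hin), pv_idxOf_prefix hFsub hin]
        rw [hsame] at hvals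
        simp only [List.map_cons]
        rw [← hvals, hsame]
        simp
      · -- fresh piece
        have hcont : (pvTableOf (PySem.List.dedup (pref.filter pvKeep))).contains c = false := by
          rw [PySem.Dict.contains_eq_decide_mem_keys, pv_keys_tableOf _ hndp]
          simpa using hin
        have hsnoc : PySem.List.dedup ((pref ++ [c]).filter pvKeep)
            = PySem.List.dedup (pref.filter pvKeep) ++ [c] := by
          rw [hfc, pv_dedup_snoc, if_neg hin]
        have htab : pvTableOf (PySem.List.dedup (pref.filter pvKeep) ++ [c])
            = (pvTableOf (PySem.List.dedup (pref.filter pvKeep))).insert c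
                (Char.ofNat ((66 : Int) + (PySem.List.dedup (pref.filter pvKeep)).length).toNat) := by
          unfold pvTableOf
          rw [PySem.List.enumerate_append, List.foldl_append]
          simp [PySem.List.enumerate]
        have hFsub' : PySem.List.dedup (List.filter pvKeep (pref ++ [c])) <+:
            PySem.List.dedup (List.filter pvKeep full) := by
          have hp := pv_dedup_prefix (List.filter pvKeep (pref ++ [c])) (List.filter pvKeep rest)
          rw [← List.filter_append, hfull] at hp
          exact hp
        have hcf : c ∈ PySem.List.dedup (List.filter pvKeep full) := by
          refine hFsub'.mem ?_
          rw [hsnoc]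
          simp
        have hidx : (PySem.List.dedup (List.filter pvKeep full)).idxOf c
            = (PySem.List.dedup (List.filter pvKeep pref)).length := by
          rw [pv_idxOf_prefix hFsub' (by rw [hsnoc]; simp), hsnoc,
            List.idxOf_append_of_notMem hin]
          simp
        rw [pvCanonLoopA, if_neg hoa, if_neg (by simpa using hcont)]
        simp only []
        rw [show (pvTableOf (PySem.List.dedup (List.filter pvKeep pref))).insert c
              (Char.ofNat ((66 : Int) + ↑(PySem.List.dedup (List.filter pvKeep pref)).length).toNat)
            = pvTableOf (PySem.List.dedup (List.filter pvKeep (pref ++ [c]))) from by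
          rw [hsnoc, htab]]
        have hlen : (66 : Int) + ↑(PySem.List.dedup (List.filter pvKeep pref)).length + 1
            = 66 + ↑(PySem.List.dedup (List.filter pvKeep (pref ++ [c]))).length := by
          rw [hsnoc]
          simp only [List.length_append, List.length_cons, List.length_nil]
          push_cast
          ring
        rw [hlen, ih (pref ++ [c]) _ hfull]
        have hval : (pvTableOf (PySem.List.dedup (List.filter pvKeep (pref ++ [c])))).getD c c
            = (pvTableOf (PySem.List.dedup (List.filter pvKeep full))).getD c c := by
          rw [hsnoc, pv_tableOf_getD _ (by rw [← hsnoc]; exact PySem.List.nodup_dedup _) c,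
            pv_tableOf_getD _ hndf c, if_pos (by simp), if_pos hcf, hidx,
            List.idxOf_append_of_notMem hin]
          simp
        rw [hval]
        simp

-- ===== VERDICT (by name: the statement is the Claim_ definition above) =====
theorem canon_labels_py_spec : Claim_equal_canon_labels_py := by
  intro board _
  unfold Spec_canon_labels_py canon_labels_py canon_labels_py_alt
  have h := pv_loopA_eq board.toList board.toList [] [] rfl
  norm_num at h
  exact congrArg String.ofList h
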